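-- pv_equiv track=rewrite | github.com/RikVN/AMR | restoreAMR/restore_amr.py | separate_quotes
-- ===== SOURCE A (Python) =====
-- def separate_quotes(line):
--     '''Separate quotes from an argument + value, i.e.
--        :op1"tom" to :op1 "tom" '''
--     quotes = 0
--     new_line = ''
--
--     for ch in line:
--         if ch == '"':
--             quotes += 1
--             if quotes % 2 != 0 and new_line[-1] != ' ':
--                 new_line += ' "'                            #add space for quote
--             else:
--                 new_line += ch
--         else:
--             new_line += ch
--     return new_line
-- ===== SOURCE B (Python) =====
-- def separate_quotes(line):
--     '''Separate quotes from an argument + value, i.e.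
--        :op1"tom" to :op1 "tom" '''
--     segments = line.split('"')
--     result = segments[0]
--     for i in range(1, len(segments)):
--         if i % 2 == 1:
--             # opening quote: needs a space before it unless one is already there
--             result += '"' if result[-1] == ' ' else ' "'
--         else:
--             # closing quote
--             result += '"'
--         result += segments[i]
--     return result
-- ===== Notes on version B (the rewrite author's own statement) =====
-- stated objective: faster
-- what changed: B splits the line on '"' into quote-free segments and rebuilds it segment by segment, deciding space insertion once per quote from the segment index parity, instead of A's character-by-character scan with a running quote counter.
-- outside the precondition, e.g. on separate_quotes('"'): A raises IndexError, B raises IndexError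
import Mathlib
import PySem

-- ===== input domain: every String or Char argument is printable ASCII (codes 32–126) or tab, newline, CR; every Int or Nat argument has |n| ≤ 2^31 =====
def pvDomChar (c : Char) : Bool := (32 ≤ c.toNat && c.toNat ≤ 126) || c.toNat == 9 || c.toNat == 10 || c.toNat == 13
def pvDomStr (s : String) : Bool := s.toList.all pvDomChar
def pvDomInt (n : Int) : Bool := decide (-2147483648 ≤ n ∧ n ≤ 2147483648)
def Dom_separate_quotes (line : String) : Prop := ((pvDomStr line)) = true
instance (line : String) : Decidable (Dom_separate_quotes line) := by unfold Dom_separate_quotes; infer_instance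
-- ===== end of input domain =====

-- B rebuilds the line from its '"'-split segments (one decision per quote) instead of
-- A's per-character scan with a quote counter; same O(n) cost, different decomposition.
-- Both Pythons raise IndexError on a line starting with '"' (excluded by Pre_).

-- ===== PORT A =====
-- loop body of A: state = (quotes, new_line); new_line[-1] ported with pyGet?
-- (Python raises IndexError when new_line is empty — those inputs are outside Pre_).
def stepA (st : Nat × List Char) (ch : Char) : Nat × List Char :=
  if ch = '"' then
    let quotes := st.1 + 1
    if quotes % 2 ≠ 0 ∧ PySem.List.pyGet? st.2 (-1) ≠ some ' ' then
      (quotes, st.2 ++ [' ', '"'])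
    else
      (quotes, st.2 ++ [ch])
  else
    (st.1, st.2 ++ [ch])

def separate_quotes (line : String) : String :=
  String.mk (line.toList.foldl stepA (0, [])).2

-- ===== PORT B =====
-- loop body of B: state = (i, result); result[-1] ported with pyGet? (raise outside Pre_).
def stepB (st : Nat × List Char) (seg : List Char) : Nat × List Char :=
  let pre :=
    if st.1 % 2 = 1 then
      (if PySem.List.pyGet? st.2 (-1) = some ' ' then ['"'] else [' ', '"'])
    else ['"']
  (st.1 + 1, (st.2 ++ pre) ++ seg)

-- line.split('"') is ported as List.splitOn '"' (exact for a one-character separator);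
-- segments[0] is headI (split results are never empty), the loop from index 1 is a fold over tail.
def separate_quotes_alt (line : String) : String :=
  let segments := line.toList.splitOn '"'
  String.mk (segments.tail.foldl stepB (1, segments.headI)).2

-- ===== PRECONDITION & SPEC =====
-- Pre_ excludes lines beginning with '"': there both Pythons raise IndexError
-- (new_line[-1] / result[-1] on the empty string).
def Pre_separate_quotes (line : String) : Prop := line.toList.head? ≠ some '"'
instance (line : String) : Decidable (Pre_separate_quotes line) := by
  unfold Pre_separate_quotes; infer_instance

def pvWitness_separate_quotes : String := ":op1\"tom\""

def Spec_separate_quotes (line : String) (out : String) : Prop := out = separate_quotes_alt line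
instance (line : String) (out : String) : Decidable (Spec_separate_quotes line out) := by
  unfold Spec_separate_quotes; infer_instance

-- ===== CLAIM (what is proved, stated in full; the proofs are below) =====
def Claim_equal_separate_quotes : Prop := ∀ (line : String), Dom_separate_quotes line → Pre_separate_quotes line → Spec_separate_quotes line (separate_quotes line)

-- ===== LEMMAS AND PROOFS =====

-- Main invariant: A's character fold from (q, acc) equals B's segment fold
-- from (q + 1, acc ++ first segment) over the remaining segments.
lemma foldA_eq_foldB (cs : List Char) :
    ∀ (q : Nat) (acc : List Char),
      (cs.foldl stepA (q, acc)).2 =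
        (((cs.splitOn '"').tail).foldl stepB (q + 1, acc ++ (cs.splitOn '"').headI)).2 := by
  induction cs with
  | nil =>
    intro q acc
    simp [List.splitOn, List.splitOnP_nil]
  | cons c cs ih =>
    intro q acc
    obtain ⟨s0, rest, hsp⟩ :=
      List.exists_cons_of_ne_nil (List.splitOnP_ne_nil (· == '"') cs)
    have hsp' : cs.splitOn '"' = s0 :: rest := by
      simp only [List.splitOn]; exact hsp
    by_cases hc : c = '"'
    · subst hc
      have hsplit : ('"' :: cs).splitOn '"' = [] :: cs.splitOn '"' := by
        simp [List.splitOn, List.splitOnP_cons]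
      set pre := (if (q + 1) % 2 = 1 then
          (if PySem.List.pyGet? acc (-1) = some ' ' then ['"'] else [' ', '"'])
        else ['"']) with hpredef
      have hA : stepA (q, acc) '"' = (q + 1, acc ++ pre) := by
        simp only [stepA, hpredef]
        rcases Nat.mod_two_eq_zero_or_one (q + 1) with hm | hm
        · simp [hm]
        · by_cases hg : PySem.List.pyGet? acc (-1) = some ' ' <;> simp [hm, hg]
      rw [hsplit, List.tail_cons]
      simp only [List.foldl_cons, List.headI, List.append_nil]
      rw [hA, hsp', List.foldl_cons]
      have hB : stepB (q + 1, acc) s0 = (q + 2, (acc ++ pre) ++ s0) := by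
        simp [stepB, hpredef]
      rw [hB]
      have h := ih (q + 1) (acc ++ pre)
      rw [hsp'] at h
      simpa using h
    · have hsplit : (c :: cs).splitOn '"' = (c :: s0) :: rest := by
        simp only [List.splitOn, List.splitOnP_cons, hsp]
        simp [hc]
      rw [hsplit, List.tail_cons]
      simp only [List.foldl_cons, List.headI]
      have hstep : stepA (q, acc) c = (q, acc ++ [c]) := by
        simp [stepA, hc]
      rw [hstep]
      have h := ih q (acc ++ [c])
      rw [hsp'] at h
      simpa [List.append_assoc] using h

-- ===== VERDICT (by name: the statement is the Claim_ definition above) =====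
theorem separate_quotes_spec : Claim_equal_separate_quotes := by
  intro line _ _
  unfold Spec_separate_quotes separate_quotes separate_quotes_alt
  have h := foldA_eq_foldB line.toList 0 []
  simp only [List.nil_append] at h
  rw [h]
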